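-- pv_equiv track=rewrite | github.com/syha6821/advent-of-code | 2018/20/1.py | max_door
-- ===== SOURCE A (Python) =====
-- def split_by_bar(pattern):
--     result = [[]]
--     level = 0
--     for p in pattern:
--         if p == ")":
--             level -= 1
--         elif p == "(":
--             level += 1
--
--         if p == "|" and level == 0:
--             result.append([])
--         else:
--             result[-1].append(p)
--     return list(map(lambda l : "".join(l),result))
--
-- def split_by_parens(pattern):
--     result = [[]]
--     level = 0
--     for p in pattern:
--         if p == ")":
--             level -= 1
--         elif p == "(":
--             level += 1
--
--         if p == ")" and level == 0:
--             result.append([])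
--         elif p == "(" and level == 1:
--             result.append([])
--         else:
--             result[-1].append(p)
--
--     return list(map(lambda l : "".join(l),result))
--
-- def max_door(regex):
--     if not regex:
--         return 0
--     elif regex[-1] == "|":
--         return 0
--     else:
--         bars = split_by_bar(regex)
--         if len(bars) > 1:
--             return max([max_door(pattern) for pattern in bars])
--         else:
--             parens = split_by_parens(regex)
--             if len(parens) == 1:
--                 return len(parens[0])
--             else:
--                 return sum([max_door(pattern) for pattern in split_by_parens(regex)])
-- ===== SOURCE B (Python) =====
-- def max_door(regex):
--     # Single left-to-right pass with a stack of (best, current) frames per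
--     # parenthesis group; an alternative ending in '|' contributes 0.
--     stack = []
--     best = cur = 0
--     prev = ""
--     for c in regex:
--         if c == "(":
--             stack.append((best, cur))
--             best = cur = 0
--         elif c == ")":
--             val = 0 if prev == "|" else max(best, cur)
--             best, cur = stack.pop()
--             cur += val
--         elif c == "|":
--             best = max(best, cur)
--             cur = 0
--         else:
--             cur += 1
--         prev = c
--     if prev == "|":
--         return 0
--     # a group still open at the end simply runs to the end of the pattern
--     while stack:
--         b, c = stack.pop()
--         cur = c + max(best, cur)
--         best = b
--     return max(best, cur)
-- ===== Notes on version B (the rewrite author's own statement) =====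
-- stated objective: faster
-- what changed: A recursively re-splits the string by top-level bars and parens (repeated scans per nesting level); B evaluates the whole regex in one left-to-right pass with a stack of (best, current) frames, groups still open at the end running to the end of the pattern; Pre_ excludes regexes containing an unmatched ')' (malformed input), where A silently counts the stray ')' as an ordinary character while B's stack parser raises IndexError popping an empty stack.
-- outside the precondition, e.g. on max_door(')'): A returns 1, B raises IndexError; on max_door('a)b'): A returns 3, B raises IndexError
import Mathlib
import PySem

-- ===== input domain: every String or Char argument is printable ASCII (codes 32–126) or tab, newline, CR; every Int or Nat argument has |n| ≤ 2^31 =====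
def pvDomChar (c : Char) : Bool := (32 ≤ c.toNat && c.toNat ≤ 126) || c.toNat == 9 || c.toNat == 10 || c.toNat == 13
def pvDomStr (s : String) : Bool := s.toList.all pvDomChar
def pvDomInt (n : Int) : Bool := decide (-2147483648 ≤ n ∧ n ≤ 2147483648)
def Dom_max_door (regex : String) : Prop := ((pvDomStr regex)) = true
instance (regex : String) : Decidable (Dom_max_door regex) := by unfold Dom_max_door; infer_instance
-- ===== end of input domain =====

-- B replaces A's recursive split-by-bars / split-by-parens re-scanning by a single
-- left-to-right pass with a stack of (best, current) frames (objective: faster);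
-- Pre_ restricts to regexes with no unmatched ')'.

-- ===== PORT A =====

-- the level update shared by the two leading if/elif branches of both splitters
def pvUpd (level : Int) (p : Char) : Int :=
  if p = ')' then level - 1 else if p = '(' then level + 1 else level

-- the for-loop of split_by_bar; `done` models result[:-1], `cur` models result[-1]
def splitByBarAux : List (List Char) → List Char → Int → List Char → List (List Char)
  | done, cur, _, [] => done ++ [cur]
  | done, cur, level, p :: rest =>
    let level' := pvUpd level p
    if p = '|' ∧ level' = 0 then splitByBarAux (done ++ [cur]) [] level' rest
    else splitByBarAux done (cur ++ [p]) level' rest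

def splitByBar (pattern : List Char) : List (List Char) := splitByBarAux [] [] 0 pattern

-- the for-loop of split_by_parens
def splitByParensAux : List (List Char) → List Char → Int → List Char → List (List Char)
  | done, cur, _, [] => done ++ [cur]
  | done, cur, level, p :: rest =>
    let level' := pvUpd level p
    if p = ')' ∧ level' = 0 then splitByParensAux (done ++ [cur]) [] level' rest
    else if p = '(' ∧ level' = 1 then splitByParensAux (done ++ [cur]) [] level' rest
    else splitByParensAux done (cur ++ [p]) level' rest

def splitByParens (pattern : List Char) : List (List Char) := splitByParensAux [] [] 0 pattern

-- Python's max(l) on a nonempty list of ints (the .getD 0 default is never used by A)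
def pyMaxList (l : List Int) : Int := (PySem.List.max? l (fun y => y)).getD 0

-- invariant of both splitter loops, needed for max_door's termination:
-- total length of the parts + number of parts = length of done-part + current + 1 + input
theorem splitByBarAux_len : ∀ (cs : List Char) (done : List (List Char)) (cur : List Char) (l : Int),
    ((splitByBarAux done cur l cs).map List.length).sum + (splitByBarAux done cur l cs).length
      = (done.map List.length).sum + done.length + cur.length + 1 + cs.length := by
  intro cs
  induction cs with
  | nil => intro done cur l; simp [splitByBarAux]; omega
  | cons c cs ih =>
    intro done cur l
    simp only [splitByBarAux]
    split
    · rw [ih]; simp; omega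
    · rw [ih]; simp; omega

theorem splitByParensAux_len : ∀ (cs : List Char) (done : List (List Char)) (cur : List Char) (l : Int),
    ((splitByParensAux done cur l cs).map List.length).sum + (splitByParensAux done cur l cs).length
      = (done.map List.length).sum + done.length + cur.length + 1 + cs.length := by
  intro cs
  induction cs with
  | nil => intro done cur l; simp [splitByParensAux]; omega
  | cons c cs ih =>
    intro done cur l
    simp only [splitByParensAux]
    split
    · rw [ih]; simp; omega
    · split
      · rw [ih]; simp; omega
      · rw [ih]; simp; omega

theorem splitByParensAux_len_pos : ∀ (cs : List Char) (done : List (List Char)) (cur : List Char) (l : Int),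
    done.length + 1 ≤ (splitByParensAux done cur l cs).length := by
  intro cs
  induction cs with
  | nil => intro done cur l; simp [splitByParensAux]
  | cons c cs ih =>
    intro done cur l
    simp only [splitByParensAux]
    split
    · have := ih (done ++ [cur]) [] (pvUpd l c); simp at this; omega
    · split
      · have := ih (done ++ [cur]) [] (pvUpd l c); simp at this; omega
      · exact ih done (cur ++ [c]) (pvUpd l c)

theorem splitByBar_part_lt {cs p : List Char} (hmem : p ∈ splitByBar cs)
    (hlen : 1 < (splitByBar cs).length) : p.length < cs.length := by
  have h := splitByBarAux_len cs [] [] 0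
  have hple : p.length ≤ ((splitByBar cs).map List.length).sum :=
    List.le_sum_of_mem (List.mem_map_of_mem hmem)
  simp only [splitByBar, List.map_nil, List.sum_nil, List.length_nil] at h hple hlen
  omega

theorem splitByParens_part_lt {cs p : List Char} (hmem : p ∈ splitByParens cs)
    (hlen : ¬ (splitByParens cs).length = 1) : p.length < cs.length := by
  have h := splitByParensAux_len cs [] [] 0
  have hpos := splitByParensAux_len_pos cs [] [] 0
  have hple : p.length ≤ ((splitByParens cs).map List.length).sum :=
    List.le_sum_of_mem (List.mem_map_of_mem hmem)
  simp only [splitByParens, List.map_nil, List.sum_nil, List.length_nil] at h hpos hple hlen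
  omega

def maxDoorL (cs : List Char) : Int :=
  if cs = [] then 0
  else if cs.getLast? = some '|' then 0
  else if h : 1 < (splitByBar cs).length then
    pyMaxList ((splitByBar cs).attach.map fun p => maxDoorL p.1)
  else if (splitByParens cs).length = 1 then ((splitByParens cs).headI.length : Int)
  else ((splitByParens cs).attach.map fun p => maxDoorL p.1).sum
termination_by cs.length
decreasing_by
  · exact splitByBar_part_lt p.2 h
  · exact splitByParens_part_lt p.2 (by assumption)

def max_door (regex : String) : Int := maxDoorL regex.toList

-- ===== PORT B =====

-- the for-loop of B: stack of (best, cur) frames of the enclosing groups;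
-- `none` models the IndexError of stack.pop() on an empty stack
def altRun : List (Int × Int) → Int → Int → Char → List Char →
    Option (List (Int × Int) × Int × Int × Char)
  | stk, best, cur, prev, [] => some (stk, best, cur, prev)
  | stk, best, cur, prev, c :: cs =>
    if c = '(' then altRun ((best, cur) :: stk) 0 0 c cs
    else if c = ')' then
      match stk with
      | [] => none
      | (b2, c2) :: rest =>
          altRun rest b2 (c2 + (if prev = '|' then 0 else max best cur)) c cs
    else if c = '|' then altRun stk (max best cur) 0 c cs
    else altRun stk best (cur + 1) c cs

-- the final while-loop: a group still open at the end runs to the end of the pattern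
def altUnwind : List (Int × Int) → Int → Int → Int
  | [], best, cur => max best cur
  | (b, c) :: rest, best, cur => altUnwind rest b (c + max best cur)

def maxDoorAltL (cs : List Char) : Int :=
  -- the ' ' models Python's prev = "": prev is only ever compared with '|',
  -- and Source B never compares prev before a character has been consumed
  match altRun [] 0 0 ' ' cs with
  | none => 0   -- unreachable inside Pre_ (no unmatched ')')
  | some (stk, best, cur, prev) => if prev = '|' then 0 else altUnwind stk best cur

def max_door_alt (regex : String) : Int := maxDoorAltL regex.toList

-- ===== PRECONDITION & SPEC =====

-- running parenthesis check: no prefix closes more groups than it has opened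
def balChk : List Char → Int → Bool
  | [], _ => true
  | c :: cs, l =>
    let l' := if c = '(' then l + 1 else if c = ')' then l - 1 else l
    (decide (0 ≤ l')) && balChk cs l'

-- Pre_ excludes regexes containing an unmatched ')' (malformed input): there A
-- silently counts the stray ')' as an ordinary character, while B's stack parser
-- raises IndexError popping an empty stack.
def Pre_max_door (regex : String) : Prop := balChk regex.toList 0 = true
instance (regex : String) : Decidable (Pre_max_door regex) := by unfold Pre_max_door; infer_instance

def pvWitness_max_door : String := "a(b|cd)e"

def Spec_max_door (regex : String) (out : Int) : Prop := out = max_door_alt regex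
instance (regex : String) (out : Int) : Decidable (Spec_max_door regex out) := by unfold Spec_max_door; infer_instance

-- ===== CLAIM (what is proved, stated in full; the proofs are below) =====
def Claim_equal_max_door : Prop := ∀ (regex : String), Dom_max_door regex → Pre_max_door regex → Spec_max_door regex (max_door regex)


-- ===== LEMMAS AND PROOFS =====

-- ---- a guarded reference machine, used only by the proofs: it agrees with A on ALL
-- inputs (main_equiv below) and with B's machine on balanced inputs (alt_eq_old) ----

abbrev PvState := List (Int × Int) × Int × Char

def pvStepCore (fs : List (Int × Int)) (level : Int) (prev : Char) (c : Char) : PvState :=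
    if c = '(' ∧ 0 ≤ level then ((0, 0) :: fs, level + 1, c)
    else if c = ')' ∧ 0 < level then
      match fs with
      | (b, cu) :: (b2, c2) :: rest =>
          ((b2, c2 + (if prev = '|' then 0 else max b cu)) :: rest, level - 1, c)
      | _ => (fs, level - 1, c)
    else if c = '|' ∧ 0 ≤ level then
      match fs with
      | (b, cu) :: rest => ((max b cu, 0) :: rest, level, c)
      | [] => ([], level, c)
    else
      match fs with
      | (b, cu) :: rest => ((b, cu + 1) :: rest, pvUpd level c, c)
      | [] => ([], pvUpd level c, c)

def pvStep : PvState → Char → PvState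
  | (fs, level, prev), c => pvStepCore fs level prev c

def pvFinish : List (Int × Int) → Int
  | [] => 0
  | (b, c) :: rest => rest.foldl (fun v f => max f.1 (f.2 + v)) (max b c)

def oldAltL (cs : List Char) : Int :=
  if cs.getLast? = some '|' then 0
  else pvFinish (cs.foldl pvStep ([(0, 0)], 0, ' ')).1

-- ---- recursive reformulations of A's two splitter loops ----

def sbR : List Char → Int → List (List Char)
  | [], _ => [[]]
  | c :: cs, l =>
    if c = '|' ∧ pvUpd l c = 0 then [] :: sbR cs (pvUpd l c)
    else
      match sbR cs (pvUpd l c) with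
      | h :: t => (c :: h) :: t
      | [] => [[c]]

def spR : List Char → Int → List (List Char)
  | [], _ => [[]]
  | c :: cs, l =>
    if (c = ')' ∧ pvUpd l c = 0) ∨ (c = '(' ∧ pvUpd l c = 1) then [] :: spR cs (pvUpd l c)
    else
      match spR cs (pvUpd l c) with
      | h :: t => (c :: h) :: t
      | [] => [[c]]

-- '|' never occurs while the running level is 0
def noBar : List Char → Int → Prop
  | [], _ => True
  | c :: cs, l => ¬(c = '|' ∧ l = 0) ∧ noBar cs (pvUpd l c)

-- the running level stays ≤ 0 after every character
def lowAll : List Char → Int → Prop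
  | [], _ => True
  | c :: cs, l => pvUpd l c ≤ 0 ∧ lowAll cs (pvUpd l c)

-- the running level stays ≥ 0 after every character
def hiAll : List Char → Int → Prop
  | [], _ => True
  | c :: cs, l => 0 ≤ pvUpd l c ∧ hiAll cs (pvUpd l c)

def lvlOf (cs : List Char) (l : Int) : Int := cs.foldl pvUpd l

theorem sbR_ne_nil (cs : List Char) (l : Int) : sbR cs l ≠ [] := by
  cases cs with
  | nil => simp [sbR]
  | cons c cs =>
    simp only [sbR]
    split
    · simp
    · split <;> simp

theorem spR_ne_nil (cs : List Char) (l : Int) : spR cs l ≠ [] := by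
  cases cs with
  | nil => simp [spR]
  | cons c cs =>
    simp only [spR]
    split
    · simp
    · split <;> simp

theorem splitByBarAux_eq (cs : List Char) : ∀ (done : List (List Char)) (cur : List Char) (l : Int),
    splitByBarAux done cur l cs = done ++ (cur ++ (sbR cs l).headI) :: (sbR cs l).tail := by
  induction cs with
  | nil => intro done cur l; simp [splitByBarAux, sbR]
  | cons c cs ih =>
    intro done cur l
    simp only [splitByBarAux, sbR]
    cases hq : sbR cs (pvUpd l c) with
    | nil => exact absurd hq (sbR_ne_nil _ _)
    | cons h t =>
      split
      · rw [ih, hq]; simp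
      · rw [ih, hq]; simp

theorem splitByBar_eq (cs : List Char) : splitByBar cs = sbR cs 0 := by
  rw [splitByBar, splitByBarAux_eq]
  cases hq : sbR cs 0 with
  | nil => exact absurd hq (sbR_ne_nil _ _)
  | cons h t => simp

theorem splitByParensAux_eq (cs : List Char) : ∀ (done : List (List Char)) (cur : List Char) (l : Int),
    splitByParensAux done cur l cs = done ++ (cur ++ (spR cs l).headI) :: (spR cs l).tail := by
  induction cs with
  | nil => intro done cur l; simp [splitByParensAux, spR]
  | cons c cs ih =>
    intro done cur l
    simp only [splitByParensAux, spR]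
    cases hq : spR cs (pvUpd l c) with
    | nil => exact absurd hq (spR_ne_nil _ _)
    | cons h t =>
      by_cases h1 : c = ')' ∧ pvUpd l c = 0
      · obtain ⟨rfl, hv⟩ := h1
        rw [if_pos ⟨rfl, hv⟩, if_pos (Or.inl ⟨rfl, hv⟩), ih, hq]
        simp
      · by_cases h2 : c = '(' ∧ pvUpd l c = 1
        · obtain ⟨rfl, hv⟩ := h2
          rw [if_neg (by rintro ⟨hx, -⟩; exact absurd hx (by decide)), if_pos ⟨rfl, hv⟩,
            if_pos (Or.inr ⟨rfl, hv⟩), ih, hq]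
          simp
        · rw [if_neg h1, if_neg h2, if_neg (by tauto), ih, hq]
          simp

theorem splitByParens_eq (cs : List Char) : splitByParens cs = spR cs 0 := by
  rw [splitByParens, splitByParensAux_eq]
  cases hq : spR cs 0 with
  | nil => exact absurd hq (spR_ne_nil _ _)
  | cons h t => simp

-- ---- level bookkeeping ----

theorem lvlOf_nil (l : Int) : lvlOf [] l = l := rfl
theorem lvlOf_cons (c : Char) (cs : List Char) (l : Int) : lvlOf (c :: cs) l = lvlOf cs (pvUpd l c) := rfl
theorem lvlOf_append (xs ys : List Char) (l : Int) : lvlOf (xs ++ ys) l = lvlOf ys (lvlOf xs l) :=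
  List.foldl_append
theorem pvUpd_close (l : Int) : pvUpd l ')' = l - 1 := by simp [pvUpd]
theorem pvUpd_open (l : Int) : pvUpd l '(' = l + 1 := by simp [pvUpd]
theorem pvUpd_other {c : Char} (l : Int) (h1 : c ≠ ')') (h2 : c ≠ '(') : pvUpd l c = l := by
  simp [pvUpd, h1, h2]
theorem pvUpd_shift (l d : Int) (c : Char) : pvUpd (l + d) c = pvUpd l c + d := by
  unfold pvUpd; split <;> [omega; (split <;> omega)]
theorem lvlOf_shift (cs : List Char) (l d : Int) : lvlOf cs (l + d) = lvlOf cs l + d := by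
  induction cs generalizing l with
  | nil => rfl
  | cons c cs ih => rw [lvlOf_cons, lvlOf_cons, pvUpd_shift, ih]

theorem noBar_append {xs ys : List Char} {l : Int} :
    noBar (xs ++ ys) l ↔ noBar xs l ∧ noBar ys (lvlOf xs l) := by
  induction xs generalizing l with
  | nil => simp [noBar, lvlOf_nil]
  | cons c xs ih => simp [noBar, lvlOf_cons, ih, and_assoc]

theorem hiAll_lvl_nonneg {cs : List Char} {l : Int} (h0 : 0 ≤ l) (h : hiAll cs l) :
    0 ≤ lvlOf cs l := by
  induction cs generalizing l with
  | nil => exact h0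
  | cons c cs ih => exact ih h.1 h.2

-- a piece ending at running level 0 without a level-0 bar cannot end in '|'
theorem noBar_getLast_ne {u : List Char} {l : Int} (hnb : noBar u l) (hl : lvlOf u l = 0) :
    u.getLast? ≠ some '|' := by
  intro hlast
  obtain ⟨q, rfl⟩ : ∃ q, u = q ++ ['|'] := ⟨u.dropLast, by
    have := List.getLast?_eq_some_iff.mp hlast
    obtain ⟨ys, hys⟩ := this
    simp [hys]⟩
  rw [noBar_append] at hnb
  rw [lvlOf_append] at hl
  have h1 : lvlOf ['|'] (lvlOf q l) = lvlOf q l := by simp [lvlOf, pvUpd]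
  exact hnb.2.1 ⟨rfl, by omega⟩

-- ---- splitter decompositions ----

theorem sbR_of_noBar {cs : List Char} {l : Int} (h : noBar cs l) : sbR cs l = [cs] := by
  induction cs generalizing l with
  | nil => rfl
  | cons c cs ih =>
    obtain ⟨h1, h2⟩ := h
    have hbar : ¬ (c = '|' ∧ pvUpd l c = 0) := by
      rintro ⟨rfl, hv⟩
      exact h1 ⟨rfl, by simpa [pvUpd] using hv⟩
    simp only [sbR, if_neg hbar, ih h2]

theorem sbR_decomp {cs : List Char} {l : Int} (h : ¬ noBar cs l) :
    ∃ t1 rest, cs = t1 ++ '|' :: rest ∧ noBar t1 l ∧ lvlOf t1 l = 0 ∧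
      sbR cs l = t1 :: sbR rest 0 := by
  induction cs generalizing l with
  | nil => exact absurd trivial h
  | cons c cs ih =>
    by_cases hbar : c = '|' ∧ l = 0
    · obtain ⟨rfl, rfl⟩ := hbar
      refine ⟨[], cs, by simp, by trivial, rfl, ?_⟩
      simp [sbR, pvUpd]
    · have h2 : ¬ noBar cs (pvUpd l c) := fun hn => h ⟨hbar, hn⟩
      obtain ⟨t1, rest, rfl, hnb, hlv, heq⟩ := ih h2
      have hbar' : ¬ (c = '|' ∧ pvUpd l c = 0) := by
        rintro ⟨rfl, hv⟩
        exact hbar ⟨rfl, by simpa [pvUpd] using hv⟩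
      refine ⟨c :: t1, rest, by simp, ⟨hbar, hnb⟩, hlv, ?_⟩
      simp only [sbR, if_neg hbar', heq]

theorem closeFind : ∀ (cs : List Char) (l : Int), 0 ≤ l →
    (∃ w rest, cs = w ++ ')' :: rest ∧ hiAll w l ∧ lvlOf w l = 0) ∨ hiAll cs l := by
  intro cs
  induction cs with
  | nil => exact fun l _ => Or.inr trivial
  | cons c cs ih =>
    intro l hl
    by_cases hc : c = ')' ∧ l = 0
    · exact Or.inl ⟨[], cs, by simp [hc.1], trivial, hc.2⟩
    · have hl' : 0 ≤ pvUpd l c := by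
        by_cases hc' : c = ')'
        · have : l ≠ 0 := fun h0 => hc ⟨hc', h0⟩
          simp only [pvUpd, if_pos hc']; omega
        · unfold pvUpd
          rw [if_neg hc']
          split <;> omega
      rcases ih (pvUpd l c) hl' with ⟨w, rest, rfl, hw, hlv⟩ | hhi
      · exact Or.inl ⟨c :: w, rest, by simp, ⟨hl', hw⟩, by rw [lvlOf_cons]; exact hlv⟩
      · exact Or.inr ⟨hl', hhi⟩

theorem spR_group_closed : ∀ (w : List Char) (rest : List Char) (l : Int), 0 ≤ l →
    hiAll w l → lvlOf w l = 0 → spR (w ++ ')' :: rest) (l + 1) = w :: spR rest 0 := by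
  intro w
  induction w with
  | nil =>
    intro rest l _ _ hlv
    have : l = 0 := hlv
    subst this
    simp [spR, pvUpd]
  | cons c w ih =>
    intro rest l hl hhi hlv
    obtain ⟨h1, h2⟩ := hhi
    have hsh : pvUpd (l + 1) c = pvUpd l c + 1 := pvUpd_shift l 1 c
    have hcond : ¬ ((c = ')' ∧ pvUpd l c + 1 = 0) ∨ (c = '(' ∧ pvUpd l c + 1 = 1)) := by
      rintro (⟨rfl, hv⟩ | ⟨rfl, hv⟩)
      · omega
      · rw [pvUpd_open] at hv; omega
    have hrec := ih rest (pvUpd l c) h1 h2 hlv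
    simp only [List.cons_append, spR, if_neg hcond, hsh, hrec]

theorem spR_group_open : ∀ (w : List Char) (l : Int), 0 ≤ l →
    hiAll w l → spR w (l + 1) = [w] := by
  intro w
  induction w with
  | nil => intro l _ _; rfl
  | cons c w ih =>
    intro l hl hhi
    obtain ⟨h1, h2⟩ := hhi
    have hsh : pvUpd (l + 1) c = pvUpd l c + 1 := pvUpd_shift l 1 c
    have hcond : ¬ ((c = ')' ∧ pvUpd l c + 1 = 0) ∨ (c = '(' ∧ pvUpd l c + 1 = 1)) := by
      rintro (⟨rfl, hv⟩ | ⟨rfl, hv⟩)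
      · omega
      · rw [pvUpd_open] at hv; omega
    simp only [spR, if_neg hcond, hsh, ih (pvUpd l c) h1 h2]

-- trichotomy of a bar-free piece at level ≤ 0: all-literal, or a first group that closes,
-- or a first group that stays open to the end
theorem spR_trichotomy : ∀ (cs : List Char) (l : Int), l ≤ 0 → noBar cs l →
    (lowAll cs l ∧ spR cs l = [cs])
    ∨ (∃ u w rest, cs = u ++ '(' :: w ++ ')' :: rest ∧ lowAll u l ∧ noBar u l ∧ lvlOf u l = 0 ∧
        hiAll w 0 ∧ lvlOf w 0 = 0 ∧ noBar rest 0 ∧ spR cs l = u :: w :: spR rest 0)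
    ∨ (∃ u w, cs = u ++ '(' :: w ∧ lowAll u l ∧ noBar u l ∧ lvlOf u l = 0 ∧
        hiAll w 0 ∧ spR cs l = [u, w]) := by
  intro cs
  induction cs with
  | nil => exact fun l _ _ => Or.inl ⟨trivial, rfl⟩
  | cons c cs ih =>
    intro l hl hnb
    obtain ⟨hb1, hb2⟩ := hnb
    by_cases hc : c = '(' ∧ l = 0
    · obtain ⟨rfl, rfl⟩ := hc
      have hup : pvUpd 0 '(' = 1 := by decide
      rcases closeFind cs 0 le_rfl with ⟨w, rest, rfl, hw, hlv⟩ | hw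
      · have hnbr : noBar rest 0 := by
          rw [hup] at hb2
          rw [noBar_append] at hb2
          have h3 := hb2.2
          rw [show lvlOf w 1 = 1 by rw [show (1:Int) = 0 + 1 by ring, lvlOf_shift]; omega] at h3
          have h4 := h3.2
          rwa [pvUpd_close, show (1:Int) - 1 = 0 by ring] at h4
        have hgc := spR_group_closed w rest 0 le_rfl hw hlv
        norm_num at hgc
        refine Or.inr (Or.inl ⟨[], w, rest, rfl, ?_, ?_, rfl, hw, hlv, hnbr, ?_⟩)
        · trivial
        · trivial
        · simp [spR, pvUpd, hgc]
      · have hgo := spR_group_open cs 0 le_rfl hw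
        norm_num at hgo
        refine Or.inr (Or.inr ⟨[], cs, rfl, ?_, ?_, rfl, hw, ?_⟩)
        · trivial
        · trivial
        · simp [spR, pvUpd, hgo]
    · have hl' : pvUpd l c ≤ 0 := by
        by_cases h' : c = '('
        · have : l ≠ 0 := fun h0 => hc ⟨h', h0⟩
          rw [h', pvUpd_open]; omega
        · by_cases h2 : c = ')'
          · rw [h2, pvUpd_close]; omega
          · rw [pvUpd_other l h2 h']; omega
      have hcond : ¬ ((c = ')' ∧ pvUpd l c = 0) ∨ (c = '(' ∧ pvUpd l c = 1)) := by
        rintro (⟨rfl, hv⟩ | ⟨rfl, hv⟩)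
        · rw [pvUpd_close] at hv; omega
        · omega
      rcases ih (pvUpd l c) hl' hb2 with ⟨hlow, hsp⟩ | ⟨u, w, rest, heq, hlowu, hnbu, hlvu, hw, hlvw, hnbr, hsp⟩ | ⟨u, w, heq, hlowu, hnbu, hlvu, hw, hsp⟩
      · exact Or.inl ⟨⟨hl', hlow⟩, by simp only [spR, if_neg hcond, hsp]⟩
      · exact Or.inr (Or.inl ⟨c :: u, w, rest, by rw [heq]; simp, ⟨hl', hlowu⟩, ⟨hb1, hnbu⟩,
          by rw [lvlOf_cons]; exact hlvu, hw, hlvw, hnbr,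
          by rw [show c :: cs = c :: cs from rfl]; simp only [spR, if_neg hcond, hsp]⟩)
      · exact Or.inr (Or.inr ⟨c :: u, w, by rw [heq]; simp, ⟨hl', hlowu⟩, ⟨hb1, hnbu⟩,
          by rw [lvlOf_cons]; exact hlvu, hw,
          by simp only [spR, if_neg hcond, hsp]⟩)

-- ---- machine bookkeeping ----

theorem getLastD_cons (c : Char) (cs : List Char) (p : Char) :
    ((c :: cs).getLast?).getD p = (cs.getLast?).getD c := by
  cases cs with
  | nil => rfl
  | cons d t =>
    rw [List.getLast?_cons_cons]
    have h : (d :: t).getLast?.isSome := List.getLast?_isSome.mpr (List.cons_ne_nil d t)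
    obtain ⟨x, hx⟩ := Option.isSome_iff_exists.mp h
    rw [hx]
    rfl

theorem pvStep_def (fs : List (Int × Int)) (l : Int) (p c : Char) :
    pvStep (fs, l, p) c = pvStepCore fs l p c := rfl

theorem pvStep_lvl (fs : List (Int × Int)) (l : Int) (p c : Char) :
    (pvStep (fs, l, p) c).2.1 = pvUpd l c := by
  rw [pvStep_def]
  unfold pvStepCore
  by_cases h1 : c = '(' ∧ 0 ≤ l
  · rw [if_pos h1, h1.1, pvUpd_open]
  · rw [if_neg h1]
    by_cases h2 : c = ')' ∧ 0 < l
    · rw [if_pos h2, h2.1, pvUpd_close]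
      rcases fs with _ | ⟨⟨b, cu⟩, _ | ⟨⟨b2, c2⟩, rest⟩⟩ <;> rfl
    · rw [if_neg h2]
      by_cases h3 : c = '|' ∧ 0 ≤ l
      · rw [if_pos h3, h3.1, pvUpd_other _ (by decide) (by decide)]
        rcases fs with _ | ⟨⟨b, cu⟩, rest⟩ <;> rfl
      · rw [if_neg h3]
        rcases fs with _ | ⟨⟨b, cu⟩, rest⟩ <;> rfl

theorem pvStep_prev (fs : List (Int × Int)) (l : Int) (p c : Char) :
    (pvStep (fs, l, p) c).2.2 = c := by
  rw [pvStep_def]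
  unfold pvStepCore
  by_cases h1 : c = '(' ∧ 0 ≤ l
  · rw [if_pos h1]
  · rw [if_neg h1]
    by_cases h2 : c = ')' ∧ 0 < l
    · rw [if_pos h2]; rcases fs with _ | ⟨⟨b, cu⟩, _ | ⟨⟨b2, c2⟩, rest⟩⟩ <;> rfl
    · rw [if_neg h2]
      by_cases h3 : c = '|' ∧ 0 ≤ l
      · rw [if_pos h3]; rcases fs with _ | ⟨⟨b, cu⟩, rest⟩ <;> rfl
      · rw [if_neg h3]; rcases fs with _ | ⟨⟨b, cu⟩, rest⟩ <;> rfl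

theorem run_lvl (cs : List Char) : ∀ (fs : List (Int × Int)) (l : Int) (p : Char),
    (cs.foldl pvStep (fs, l, p)).2.1 = lvlOf cs l := by
  induction cs with
  | nil => intro fs l p; rfl
  | cons c cs ih =>
    intro fs l p
    rw [List.foldl_cons, lvlOf_cons]
    rcases hst : pvStep (fs, l, p) c with ⟨fs2, l2, p2⟩
    have h := pvStep_lvl fs l p c
    rw [hst] at h
    simp only at h
    rw [ih fs2 l2 p2, h]

theorem run_prev (cs : List Char) : ∀ (fs : List (Int × Int)) (l : Int) (p : Char),
    (cs.foldl pvStep (fs, l, p)).2.2 = cs.getLast?.getD p := by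
  induction cs with
  | nil => intro fs l p; rfl
  | cons c cs ih =>
    intro fs l p
    rw [List.foldl_cons, getLastD_cons]
    rcases hst : pvStep (fs, l, p) c with ⟨fs2, l2, p2⟩
    have h := pvStep_prev fs l p c
    rw [hst] at h
    simp only at h
    rw [ih fs2 l2 p2, h]

theorem run_stack_len (cs : List Char) : ∀ (fs : List (Int × Int)) (l : Int) (p : Char),
    fs.length = (max l 0).toNat + 1 →
    (cs.foldl pvStep (fs, l, p)).1.length = (max (lvlOf cs l) 0).toNat + 1 := by
  induction cs with
  | nil => intro fs l p h; exact h
  | cons c cs ih =>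
    intro fs l p hlen
    rw [List.foldl_cons, lvlOf_cons]
    have hstep : (pvStep (fs, l, p) c).1.length = (max (pvUpd l c) 0).toNat + 1 := by
      rw [pvStep_def]
      unfold pvStepCore
      by_cases h1 : c = '(' ∧ 0 ≤ l
      · obtain ⟨rfl, h0⟩ := h1
        rw [if_pos ⟨rfl, h0⟩, pvUpd_open]
        simp only [List.length_cons, hlen]
        omega
      · rw [if_neg h1]
        by_cases h2 : c = ')' ∧ 0 < l
        · obtain ⟨rfl, h0⟩ := h2
          rw [if_pos ⟨rfl, h0⟩, pvUpd_close]
          rcases fs with _ | ⟨⟨b, cu⟩, _ | ⟨⟨b2, c2⟩, rest⟩⟩ <;>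
            simp only [List.length_cons, List.length_nil] at hlen ⊢ <;> omega
        · rw [if_neg h2]
          by_cases h3 : c = '|' ∧ 0 ≤ l
          · obtain ⟨rfl, h0⟩ := h3
            rw [if_pos ⟨rfl, h0⟩, pvUpd_other _ (by decide) (by decide)]
            rcases fs with _ | ⟨⟨b, cu⟩, rest⟩ <;>
              simp only [List.length_cons, List.length_nil] at hlen ⊢ <;> omega
          · rw [if_neg h3]
            rcases fs with _ | ⟨⟨b, cu⟩, rest⟩ <;>
              simp only [List.length_cons, List.length_nil] at hlen ⊢
            · omega
            · by_cases hc1 : c = '('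
              · subst hc1
                rw [pvUpd_open]
                have : ¬ (0 ≤ l) := fun h0 => h1 ⟨rfl, h0⟩
                omega
              · by_cases hc2 : c = ')'
                · subst hc2
                  rw [pvUpd_close]
                  have : ¬ (0 < l) := fun h0 => h2 ⟨rfl, h0⟩
                  omega
                · rw [pvUpd_other _ hc2 hc1]
                  omega
    rcases hst : pvStep (fs, l, p) c with ⟨fs2, l2, p2⟩
    have hl := pvStep_lvl fs l p c
    rw [hst] at hstep hl
    simp only at hstep hl
    subst hl
    exact ih fs2 _ p2 hstep

theorem run_prev_indep (cs : List Char) (hne : cs ≠ []) (fs : List (Int × Int)) {l : Int}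
    (hl : l ≤ 0) (p p2 : Char) : cs.foldl pvStep (fs, l, p) = cs.foldl pvStep (fs, l, p2) := by
  cases cs with
  | nil => exact absurd rfl hne
  | cons c cs =>
    rw [List.foldl_cons, List.foldl_cons]
    have hstep : pvStep (fs, l, p) c = pvStep (fs, l, p2) c := by
      rw [pvStep_def, pvStep_def]
      unfold pvStepCore
      have hcl : ¬ (c = ')' ∧ 0 < l) := by rintro ⟨-, h0⟩; omega
      rw [if_neg hcl, if_neg hcl]
    rw [hstep]

-- a literal stretch (level ≤ 0 throughout, no level-0 bar) just counts its characters
theorem run_literal (cs : List Char) : ∀ (l b c0 : Int) (p : Char), l ≤ 0 →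
    noBar cs l → lowAll cs l →
    cs.foldl pvStep ([(b, c0)], l, p)
      = ([(b, c0 + cs.length)], lvlOf cs l, cs.getLast?.getD p) := by
  induction cs with
  | nil => intro l b c0 p _ _ _; simp [lvlOf_nil]
  | cons c cs ih =>
    intro l b c0 p hl hnb hlow
    obtain ⟨hb1, hb2⟩ := hnb
    obtain ⟨hw1, hw2⟩ := hlow
    have hstep : pvStep ([(b, c0)], l, p) c = ([(b, c0 + 1)], pvUpd l c, c) := by
      rw [pvStep_def]
      unfold pvStepCore
      have n1 : ¬ (c = '(' ∧ 0 ≤ l) := by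
        rintro ⟨rfl, h0⟩; rw [pvUpd_open] at hw1; omega
      have n2 : ¬ (c = ')' ∧ 0 < l) := by rintro ⟨-, h0⟩; omega
      have n3 : ¬ (c = '|' ∧ 0 ≤ l) := by
        rintro ⟨rfl, h0⟩; exact hb1 ⟨rfl, le_antisymm hl h0⟩
      rw [if_neg n1, if_neg n2, if_neg n3]
    rw [List.foldl_cons, hstep, ih _ _ _ _ hw1 hb2 hw2, lvlOf_cons, getLastD_cons]
    have : c0 + 1 + (cs.length : Int) = c0 + ((c :: cs).length : Int) := by
      simp only [List.length_cons]
      push_cast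
      ring
    rw [this]

-- running at a greater depth with extra frames below behaves like running shallow
theorem run_shift (cs : List Char) : ∀ (fs F : List (Int × Int)) (l d : Int) (p : Char),
    0 ≤ l → 0 ≤ d → fs.length = l.toNat + 1 → hiAll cs l →
    cs.foldl pvStep (fs ++ F, l + d, p) =
      ((cs.foldl pvStep (fs, l, p)).1 ++ F, (cs.foldl pvStep (fs, l, p)).2.1 + d,
        (cs.foldl pvStep (fs, l, p)).2.2) := by
  induction cs with
  | nil => intro fs F l d p _ _ _ _; rfl
  | cons c cs ih =>
    intro fs F l d p hl hd hlen hhi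
    obtain ⟨hh1, hh2⟩ := hhi
    rw [List.foldl_cons, List.foldl_cons]
    by_cases h1 : c = '('
    · subst h1
      have e1 : pvStep (fs ++ F, l + d, p) '(' = (((0, 0) :: fs) ++ F, (l + 1) + d, '(') := by
        rw [pvStep_def]; unfold pvStepCore
        rw [if_pos ⟨rfl, by omega⟩]
        simp only [List.cons_append]
        rw [show l + d + 1 = l + 1 + d by ring]
      have e2 : pvStep (fs, l, p) '(' = ((0, 0) :: fs, l + 1, '(') := by
        rw [pvStep_def]; unfold pvStepCore
        rw [if_pos ⟨rfl, hl⟩]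
      rw [e1, e2]
      rw [pvUpd_open] at hh2
      exact ih ((0, 0) :: fs) F (l + 1) d '(' (by omega) hd
        (by simp only [List.length_cons, hlen]; omega) hh2
    · by_cases h2 : c = ')'
      · subst h2
        rw [pvUpd_close] at hh1 hh2
        have hpos : 0 < l := by omega
        rcases fs with _ | ⟨⟨b1, c1⟩, _ | ⟨⟨b2, c2⟩, rest⟩⟩
        · simp at hlen
        · simp at hlen; omega
        · have e1 : pvStep (((b1, c1) :: (b2, c2) :: rest) ++ F, l + d, p) ')'
              = (((b2, c2 + (if p = '|' then 0 else max b1 c1)) :: rest) ++ F, (l - 1) + d, ')') := by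
            rw [pvStep_def]; unfold pvStepCore
            rw [if_neg (by rintro ⟨h, -⟩; exact absurd h (by decide)), if_pos ⟨rfl, by omega⟩]
            simp only [List.cons_append]
            rw [show l + d - 1 = l - 1 + d by ring]
          have e2 : pvStep ((b1, c1) :: (b2, c2) :: rest, l, p) ')'
              = ((b2, c2 + (if p = '|' then 0 else max b1 c1)) :: rest, l - 1, ')') := by
            rw [pvStep_def]; unfold pvStepCore
            rw [if_neg (by rintro ⟨h, -⟩; exact absurd h (by decide)), if_pos ⟨rfl, hpos⟩]
          rw [e1, e2]
          exact ih _ F (l - 1) d ')' hh1 hd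
            (by simp only [List.length_cons] at hlen ⊢; omega) hh2
      · by_cases h3 : c = '|'
        · subst h3
          rw [pvUpd_other _ (by decide) (by decide)] at hh1 hh2
          rcases fs with _ | ⟨⟨b1, c1⟩, rest⟩
          · simp at hlen
          · have e1 : pvStep (((b1, c1) :: rest) ++ F, l + d, p) '|'
                = (((max b1 c1, 0) :: rest) ++ F, l + d, '|') := by
              rw [pvStep_def]; unfold pvStepCore
              rw [if_neg (by rintro ⟨h, -⟩; exact absurd h (by decide)),
                if_neg (by rintro ⟨h, -⟩; exact absurd h (by decide)),
                if_pos ⟨rfl, by omega⟩]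
              rfl
            have e2 : pvStep ((b1, c1) :: rest, l, p) '|'
                = ((max b1 c1, 0) :: rest, l, '|') := by
              rw [pvStep_def]; unfold pvStepCore
              rw [if_neg (by rintro ⟨h, -⟩; exact absurd h (by decide)),
                if_neg (by rintro ⟨h, -⟩; exact absurd h (by decide)),
                if_pos ⟨rfl, hl⟩]
            rw [e1, e2]
            exact ih _ F l d '|' hl hd (by simpa using hlen) hh2
        · rw [pvUpd_other _ h2 h1] at hh1 hh2
          rcases fs with _ | ⟨⟨b1, c1⟩, rest⟩
          · simp at hlen
          · have n1 : ¬ (c = '(' ∧ (0:Int) ≤ l + d) := by rintro ⟨h, -⟩; exact h1 h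
            have n1b : ¬ (c = '(' ∧ 0 ≤ l) := by rintro ⟨h, -⟩; exact h1 h
            have n2 : ¬ (c = ')' ∧ (0:Int) < l + d) := by rintro ⟨h, -⟩; exact h2 h
            have n2b : ¬ (c = ')' ∧ 0 < l) := by rintro ⟨h, -⟩; exact h2 h
            have n3 : ¬ (c = '|' ∧ (0:Int) ≤ l + d) := by rintro ⟨h, -⟩; exact h3 h
            have n3b : ¬ (c = '|' ∧ 0 ≤ l) := by rintro ⟨h, -⟩; exact h3 h
            have e1 : pvStep (((b1, c1) :: rest) ++ F, l + d, p) c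
                = (((b1, c1 + 1) :: rest) ++ F, pvUpd l c + d, c) := by
              rw [pvStep_def]; unfold pvStepCore
              rw [if_neg n1, if_neg n2, if_neg n3]
              simp only [List.cons_append]
              rw [pvUpd_shift]
            have e2 : pvStep ((b1, c1) :: rest, l, p) c
                = ((b1, c1 + 1) :: rest, pvUpd l c, c) := by
              rw [pvStep_def]; unfold pvStepCore
              rw [if_neg n1b, if_neg n2b, if_neg n3b]
            rw [e1, e2, pvUpd_other _ h2 h1]
            exact ih _ F l d c hl hd (by simpa using hlen) hh2

theorem pvFinish_append (S : List (Int × Int)) (b c : Int) :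
    pvFinish (S ++ [(b, c)]) = max b (c + pvFinish S) := by
  cases S with
  | nil => simp [pvFinish]
  | cons f rest =>
    obtain ⟨fb, fc⟩ := f
    show (rest ++ [(b, c)]).foldl (fun v f => max f.1 (f.2 + v)) (max fb fc)
        = max b (c + rest.foldl (fun v f => max f.1 (f.2 + v)) (max fb fc))
    rw [List.foldl_append]
    rfl

-- ---- facts about A ----

theorem pvStep_open (fs : List (Int × Int)) (l : Int) (p : Char) (hl : 0 ≤ l) :
    pvStep (fs, l, p) '(' = ((0, 0) :: fs, l + 1, '(') := by
  rw [pvStep_def]; unfold pvStepCore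
  rw [if_pos ⟨rfl, hl⟩]

theorem pvStep_bar (b cu : Int) (rest : List (Int × Int)) (l : Int) (p : Char) (hl : 0 ≤ l) :
    pvStep ((b, cu) :: rest, l, p) '|' = ((max b cu, 0) :: rest, l, '|') := by
  rw [pvStep_def]; unfold pvStepCore
  rw [if_neg (by rintro ⟨h, -⟩; exact absurd h (by decide)),
    if_neg (by rintro ⟨h, -⟩; exact absurd h (by decide)), if_pos ⟨rfl, hl⟩]

theorem pvStep_close (b1 c1 b2 c2 : Int) (rest : List (Int × Int)) (l : Int) (p : Char)
    (hl : 0 < l) :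
    pvStep ((b1, c1) :: (b2, c2) :: rest, l, p) ')'
      = ((b2, c2 + (if p = '|' then 0 else max b1 c1)) :: rest, l - 1, ')') := by
  rw [pvStep_def]; unfold pvStepCore
  rw [if_neg (by rintro ⟨h, -⟩; exact absurd h (by decide)), if_pos ⟨rfl, hl⟩]

theorem pvStep_other (b1 c1 : Int) (rest : List (Int × Int)) (l : Int) (p : Char) {c : Char}
    (h1 : c ≠ '(') (h2 : c ≠ ')') (h3 : c ≠ '|') :
    pvStep ((b1, c1) :: rest, l, p) c = ((b1, c1 + 1) :: rest, pvUpd l c, c) := by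
  rw [pvStep_def]; unfold pvStepCore
  rw [if_neg (by rintro ⟨h, -⟩; exact h1 h), if_neg (by rintro ⟨h, -⟩; exact h2 h),
    if_neg (by rintro ⟨h, -⟩; exact h3 h)]

theorem pvFinish_single (b c : Int) : pvFinish [(b, c)] = max b c := rfl

theorem maxDoorL_nil : maxDoorL [] = 0 := by
  rw [maxDoorL]
  simp

theorem maxDoorL_last_bar {cs : List Char} (h : cs.getLast? = some '|') : maxDoorL cs = 0 := by
  have hne : cs ≠ [] := by rintro rfl; simp at h
  rw [maxDoorL, if_neg hne, if_pos h]

theorem spR_of_lowAll : ∀ (cs : List Char) (l : Int), l ≤ 0 → lowAll cs l → spR cs l = [cs] := by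
  intro cs
  induction cs with
  | nil => intro l _ _; rfl
  | cons c cs ih =>
    intro l hl hlow
    obtain ⟨h1, h2⟩ := hlow
    have hcond : ¬ ((c = ')' ∧ pvUpd l c = 0) ∨ (c = '(' ∧ pvUpd l c = 1)) := by
      rintro (⟨rfl, hv⟩ | ⟨rfl, hv⟩)
      · rw [pvUpd_close] at hv; omega
      · omega
    simp only [spR, if_neg hcond, ih (pvUpd l c) h1 h2]

theorem pyMaxList_cons (x : Int) (xs : List Int) : pyMaxList (x :: xs) = xs.foldl max x := by
  rw [pyMaxList, PySem.List.max?_id_cons]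
  rfl

theorem maxDoorL_nonneg_aux : ∀ (n : Nat) (cs : List Char), cs.length ≤ n → 0 ≤ maxDoorL cs := by
  intro n
  induction n with
  | zero =>
    intro cs hlen
    have : cs = [] := List.eq_nil_of_length_eq_zero (Nat.le_zero.mp hlen)
    subst this
    rw [maxDoorL_nil]
  | succ n ih =>
    intro cs hlen
    rw [maxDoorL]
    split_ifs with h1 h2 h3 h4
    · omega
    · omega
    · have hmap : ((splitByBar cs).attach.map fun p => maxDoorL p.1)
          = (splitByBar cs).map maxDoorL := by simp
      rw [hmap]
      rcases hsb : (splitByBar cs).map maxDoorL with _ | ⟨x, xs⟩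
      · have h0 : (splitByBar cs).length = 0 := by
          simpa using congrArg List.length hsb
        omega
      · rw [pyMaxList_cons]
        have hx : 0 ≤ x := by
          have hxmem : x ∈ (splitByBar cs).map maxDoorL := by
            rw [hsb]; exact List.mem_cons_self
          obtain ⟨q, hqmem, rfl⟩ := List.mem_map.mp hxmem
          exact ih q (by have := splitByBar_part_lt hqmem h3; omega)
        calc (0:Int) ≤ x := hx
          _ ≤ xs.foldl max x := (PySem.List.le_foldl_max xs x).1
    · exact Int.natCast_nonneg _
    · have hmap : ((splitByParens cs).attach.map fun p => maxDoorL p.1)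
          = (splitByParens cs).map maxDoorL := by simp
      rw [hmap]
      apply List.sum_nonneg
      intro x hxmem
      obtain ⟨q, hqmem, rfl⟩ := List.mem_map.mp hxmem
      exact ih q (by have := splitByParens_part_lt hqmem h4; omega)

theorem maxDoorL_nonneg (cs : List Char) : 0 ≤ maxDoorL cs :=
  maxDoorL_nonneg_aux cs.length cs le_rfl

def listMax : List Int → Int
  | [] => 0
  | x :: xs => xs.foldl max x

theorem foldl_max_cons (xs : List Int) : ∀ (a b : Int),
    xs.foldl max (max a b) = max a (xs.foldl max b) := by
  induction xs with
  | nil => intro a b; rfl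
  | cons x xs ih =>
    intro a b
    rw [List.foldl_cons, List.foldl_cons, max_assoc, ih]

theorem listMax_cons (x : Int) {xs : List Int} (h : xs ≠ []) :
    listMax (x :: xs) = max x (listMax xs) := by
  rcases xs with _ | ⟨y, ys⟩
  · exact absurd rfl h
  · show (y :: ys).foldl max x = max x (ys.foldl max y)
    rw [List.foldl_cons, show max x y = max x y from rfl, foldl_max_cons]

-- a literal stretch evaluates, by A, to its length
theorem maxDoorL_literal {cs : List Char} (hnb : noBar cs 0) (hlow : lowAll cs 0)
    (hlast : cs.getLast? ≠ some '|') : maxDoorL cs = (cs.length : Int) := by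
  by_cases hne : cs = []
  · subst hne; rw [maxDoorL_nil]; rfl
  · have hbars : splitByBar cs = [cs] := by rw [splitByBar_eq, sbR_of_noBar hnb]
    have hpar : splitByParens cs = [cs] := by rw [splitByParens_eq, spR_of_lowAll cs 0 le_rfl hlow]
    rw [maxDoorL, if_neg hne, if_neg hlast, dif_neg (by rw [hbars]; simp), if_pos (by rw [hpar]; rfl)]
    rw [hpar]
    rfl

-- on a bar-free input A is the sum of its values on the paren-split parts
theorem maxDoorL_parens {cs : List Char} (hnb : noBar cs 0) (hlast : cs.getLast? ≠ some '|') :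
    maxDoorL cs = ((spR cs 0).map maxDoorL).sum := by
  by_cases hne : cs = []
  · subst hne
    show maxDoorL [] = ((spR [] 0).map maxDoorL).sum
    rw [maxDoorL_nil]
    simp [spR, maxDoorL_nil]
  · have hbars : splitByBar cs = [cs] := by rw [splitByBar_eq, sbR_of_noBar hnb]
    by_cases hone : (splitByParens cs).length = 1
    · rcases spR_trichotomy cs 0 le_rfl hnb with ⟨hlow, hsp⟩ |
        ⟨u, w, rest, heq, _, _, _, _, _, _, hsp⟩ | ⟨u, w, heq, _, _, _, _, hsp⟩
      · rw [hsp, List.map_cons, List.map_nil, List.sum_cons, List.sum_nil, add_zero]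
      · rw [splitByParens_eq, hsp] at hone
        have hne2 := spR_ne_nil rest 0
        simp at hone
      · rw [splitByParens_eq, hsp] at hone
        simp at hone
    · rw [maxDoorL, if_neg hne, if_neg hlast, dif_neg (by rw [hbars]; simp), if_neg hone]
      have hmap : ((splitByParens cs).attach.map fun p => maxDoorL p.1)
          = (splitByParens cs).map maxDoorL := by simp
      rw [hmap, splitByParens_eq]

-- A is the maximum of its values on the bar-split parts
theorem maxDoorL_bars {cs : List Char} (hlast : cs.getLast? ≠ some '|') :
    maxDoorL cs = listMax ((sbR cs 0).map maxDoorL) := by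
  by_cases hnb : noBar cs 0
  · rw [sbR_of_noBar hnb]
    rfl
  · obtain ⟨t1, rest, heq, hnb1, hlv1, hsbeq⟩ := sbR_decomp hnb
    have hne : cs ≠ [] := by rw [heq]; simp
    have hlen2 : 1 < (splitByBar cs).length := by
      rw [splitByBar_eq, hsbeq]
      have := spR_ne_nil rest 0
      rcases hr : sbR rest 0 with _ | ⟨a, as⟩
      · exact absurd hr (sbR_ne_nil rest 0)
      · simp
    rw [maxDoorL, if_neg hne, if_neg hlast, dif_pos hlen2]
    have hmap : ((splitByBar cs).attach.map fun p => maxDoorL p.1)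
        = (splitByBar cs).map maxDoorL := by simp
    rw [hmap, splitByBar_eq, hsbeq, List.map_cons, pyMaxList_cons]
    rfl

-- ---- the main induction: A equals the guarded reference machine ----

def EqBelow (n : Nat) : Prop := ∀ w : List Char, w.length < n → maxDoorL w = oldAltL w

theorem getLast?_cons_ne_nil {c : Char} {l : List Char} (h : l ≠ []) :
    (c :: l).getLast? = l.getLast? := by
  cases l with
  | nil => exact absurd rfl h
  | cons d t => exact List.getLast?_cons_cons

theorem getLast?_append_ne {xs ys : List Char} (h : ys ≠ []) :
    (xs ++ ys).getLast? = ys.getLast? := List.getLast?_append_of_ne_nil xs h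

theorem EqBelow_mono {n : Nat} (H : EqBelow (n + 1)) : EqBelow n :=
  fun w hw => H w (Nat.lt_succ_of_lt hw)

-- the value a closing ')' adds equals A's value of the group content
theorem group_val (n : Nat) (H : EqBelow n) (w : List Char) (hwlen : w.length < n)
    (hwlast : w.getLast? ≠ some '|') :
    pvFinish ((w.foldl pvStep ([(0, 0)], 0, '(')).1) = maxDoorL w := by
  by_cases hwne : w = []
  · subst hwne
    rw [maxDoorL_nil]
    rfl
  · rw [H w hwlen, oldAltL, if_neg hwlast,
      run_prev_indep w hwne [(0, 0)] le_rfl ' ' '(']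

theorem main_P : ∀ (n : Nat), EqBelow n → ∀ (cs : List Char), cs.length ≤ n →
    noBar cs 0 → cs.getLast? ≠ some '|' →
    (∀ (b c : Int) (p : Char),
      pvFinish ((cs.foldl pvStep ([(b, c)], 0, p)).1) = max b (c + ((spR cs 0).map maxDoorL).sum))
    ∧ (lvlOf cs 0 = 0 → ∀ (b c : Int) (p : Char),
      (cs.foldl pvStep ([(b, c)], 0, p)).1 = [(b, c + ((spR cs 0).map maxDoorL).sum)]
        ∧ (cs.foldl pvStep ([(b, c)], 0, p)).2.1 = 0) := by
  intro n
  induction n with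
  | zero =>
    intro H cs hlen hnb hlast
    have hnil : cs = [] := List.eq_nil_of_length_eq_zero (Nat.le_zero.mp hlen)
    subst hnil
    refine ⟨fun b c p => ?_, fun _ b c p => ⟨?_, rfl⟩⟩
    · show pvFinish [(b, c)] = max b (c + ((spR [] 0).map maxDoorL).sum)
      rw [pvFinish_single]
      simp [spR, maxDoorL_nil]
    · show [(b, c)] = [(b, c + ((spR [] 0).map maxDoorL).sum)]
      simp [spR, maxDoorL_nil]
  | succ n ih =>
    intro H cs hlen hnb hlast
    rcases spR_trichotomy cs 0 le_rfl hnb with ⟨hlow, hsp⟩ |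
      ⟨u, w, rest, rfl, hlowu, hnbu, hlvu, hw, hlvw, hnbr, hsp⟩ |
      ⟨u, w, rfl, hlowu, hnbu, hlvu, hw, hsp⟩
    · have hlit := maxDoorL_literal hnb hlow hlast
      constructor
      · intro b c p
        rw [run_literal cs 0 b c p le_rfl hnb hlow, pvFinish_single, hsp]
        simp only [List.map_cons, List.map_nil, List.sum_cons, List.sum_nil, add_zero, hlit]
      · intro hlv b c p
        refine ⟨?_, ?_⟩
        · rw [run_literal cs 0 b c p le_rfl hnb hlow, hsp]
          simp [hlit]
        · rw [run_literal cs 0 b c p le_rfl hnb hlow]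
          simp [hlv]
    · have hulen : maxDoorL u = (u.length : Int) :=
        maxDoorL_literal hnbu hlowu (noBar_getLast_ne hnbu hlvu)
      have hwlen : w.length < n + 1 := by
        have := hlen
        simp only [List.length_append, List.length_cons] at this
        omega
      have hrlen : rest.length ≤ n := by
        have := hlen
        simp only [List.length_append, List.length_cons] at this
        omega
      have hrlast : rest.getLast? ≠ some '|' := by
        by_cases hre : rest = []
        · subst hre; simp
        · rwa [getLast?_append_ne (by simp : ((')' :: rest : List Char)) ≠ []),
            getLast?_cons_ne_nil hre] at hlast
      rcases hR : w.foldl pvStep ([(0, 0)], 0, '(') with ⟨Sw, lw, pw⟩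
      have hlw : lw = 0 := by
        have := run_lvl w [(0, 0)] 0 '('
        rw [hR] at this
        simpa [hlvw] using this
      have hpw : pw = w.getLast?.getD '(' := by
        have := run_prev w [(0, 0)] 0 '('
        rw [hR] at this
        simpa using this
      have hSwlen : Sw.length = 1 := by
        have := run_stack_len w [(0, 0)] 0 '(' (by norm_num)
        rw [hR] at this
        simpa [hlvw] using this
      obtain ⟨fw, hfw⟩ := List.length_eq_one_iff.mp hSwlen
      obtain ⟨bw, cw⟩ := fw
      have hval : (if pw = '|' then 0 else max bw cw) = maxDoorL w := by
        by_cases hwbar : w.getLast? = some '|'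
        · have : pw = '|' := by rw [hpw, hwbar]; rfl
          rw [if_pos this, maxDoorL_last_bar hwbar]
        · have hpwne : pw ≠ '|' := by
            rw [hpw]
            rcases hgl : w.getLast? with _ | x
            · decide
            · simpa [hgl] using hwbar
          rw [if_neg hpwne]
          have := group_val (n + 1) H w hwlen hwbar
          rw [hR, hfw] at this
          rw [← this]
          rfl
      have hmid : ∀ (b c : Int) (p : Char),
          (u ++ '(' :: w ++ ')' :: rest).foldl pvStep ([(b, c)], 0, p)
            = rest.foldl pvStep ([(b, c + u.length + maxDoorL w)], 0, ')') := by
        intro b c p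
        have s1 : ((u ++ '(' :: w) ++ ')' :: rest).foldl pvStep ([(b, c)], 0, p)
            = (')' :: rest).foldl pvStep
              (('(' :: w).foldl pvStep ([(b, c + u.length)], 0, u.getLast?.getD p)) := by
          rw [List.foldl_append, List.foldl_append,
            run_literal u 0 b c p le_rfl hnbu hlowu, hlvu]
        have s2 : ('(' :: w).foldl pvStep ([(b, c + (u.length : Int))], 0, u.getLast?.getD p)
            = (Sw ++ [(b, c + (u.length : Int))], lw + 1, pw) := by
          rw [List.foldl_cons, pvStep_open _ _ _ le_rfl,
            show ((0, 0) :: [(b, c + (u.length : Int))])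
              = [(0, 0)] ++ [(b, c + (u.length : Int))] from rfl,
            run_shift w [(0, 0)] [(b, c + (u.length : Int))] 0 1 '(' le_rfl (by norm_num)
              (by simp) hw, hR]
        have s3 : (')' :: rest).foldl pvStep (Sw ++ [(b, c + (u.length : Int))], lw + 1, pw)
            = rest.foldl pvStep ([(b, c + u.length + maxDoorL w)], 0, ')') := by
          rw [hfw, hlw,
            show ([(bw, cw)] ++ [(b, c + (u.length : Int))])
              = (bw, cw) :: (b, c + (u.length : Int)) :: [] from rfl,
            List.foldl_cons,
            pvStep_close bw cw b (c + (u.length : Int)) [] (0 + 1) pw (by norm_num), hval]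
          norm_num
        rw [s1, s2, s3]
      have hrest := ih (EqBelow_mono H) rest hrlen hnbr hrlast
      have hsum : ((spR (u ++ '(' :: w ++ ')' :: rest) 0).map maxDoorL).sum
          = (u.length : Int) + maxDoorL w + ((spR rest 0).map maxDoorL).sum := by
        rw [hsp]
        simp only [List.map_cons, List.sum_cons, hulen]
        ring
      constructor
      · intro b c p
        rw [hmid b c p, hrest.1 b (c + u.length + maxDoorL w) ')', hsum]
        ring_nf
      · intro hlv b c p
        have hlvrest : lvlOf rest 0 = 0 := by
          rw [lvlOf_append, lvlOf_cons, pvUpd_close, lvlOf_append, hlvu, lvlOf_cons, pvUpd_open,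
            show lvlOf w (0 + 1) = lvlOf w 0 + 1 from lvlOf_shift w 0 1, hlvw] at hlv
          norm_num at hlv
          exact hlv
        obtain ⟨hst, hlv2⟩ := hrest.2 hlvrest b (c + u.length + maxDoorL w) ')'
        rw [hmid b c p]
        refine ⟨?_, hlv2⟩
        rw [hst, hsum]
        ring_nf
    · have hulen : maxDoorL u = (u.length : Int) :=
        maxDoorL_literal hnbu hlowu (noBar_getLast_ne hnbu hlvu)
      have hwlen : w.length < n + 1 := by
        have := hlen
        simp only [List.length_append, List.length_cons] at this
        omega
      have hwlast : w.getLast? ≠ some '|' := by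
        by_cases hwe : w = []
        · subst hwe; simp
        · rwa [getLast?_append_ne (by simp : ('(' :: w : List Char) ≠ []),
            getLast?_cons_ne_nil hwe] at hlast
      have hgv := group_val (n + 1) H w hwlen hwlast
      constructor
      · intro b c p
        rw [List.foldl_append, run_literal u 0 b c p le_rfl hnbu hlowu, hlvu,
          List.foldl_cons, pvStep_open _ _ _ le_rfl]
        rw [show ((0, 0) :: [(b, c + (u.length : Int))]) = [(0, 0)] ++ [(b, c + (u.length : Int))]
          from rfl]
        rw [run_shift w [(0, 0)] [(b, c + (u.length : Int))] 0 1 '(' le_rfl (by norm_num)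
          (by norm_num) hw]
        dsimp only
        rw [pvFinish_append, hgv, hsp]
        simp only [List.map_cons, List.map_nil, List.sum_cons, List.sum_nil, add_zero, hulen]
        ring_nf
      · intro hlv
        exfalso
        rw [lvlOf_append, hlvu, lvlOf_cons, pvUpd_open,
          show lvlOf w (0 + 1) = lvlOf w 0 + 1 from lvlOf_shift w 0 1] at hlv
        have := hiAll_lvl_nonneg le_rfl hw
        omega

theorem main_bars : ∀ (n : Nat), EqBelow n → ∀ (cs : List Char), cs.length ≤ n →
    cs.getLast? ≠ some '|' → ∀ (b : Int) (p : Char),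
    pvFinish ((cs.foldl pvStep ([(b, 0)], 0, p)).1)
      = max b (listMax ((sbR cs 0).map maxDoorL)) := by
  intro n
  induction n with
  | zero =>
    intro H cs hlen hlast b p
    have hnil : cs = [] := List.eq_nil_of_length_eq_zero (Nat.le_zero.mp hlen)
    subst hnil
    show pvFinish [(b, 0)] = _
    rw [pvFinish_single]
    simp [sbR, listMax, maxDoorL_nil]
  | succ n ihn =>
    intro H cs hlen hlast b p
    by_cases hnb : noBar cs 0
    · rw [(main_P (n + 1) H cs hlen hnb hlast).1 b 0 p, sbR_of_noBar hnb,
        ← maxDoorL_parens hnb hlast]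
      show max b (0 + maxDoorL cs) = max b (listMax [maxDoorL cs])
      rw [zero_add]
      rfl
    · obtain ⟨t1, rest, rfl, hnb1, hlv1, hsbeq⟩ := sbR_decomp hnb
      have ht1last : t1.getLast? ≠ some '|' := noBar_getLast_ne hnb1 hlv1
      have ht1len : t1.length ≤ n + 1 := by
        simp only [List.length_append, List.length_cons] at hlen
        omega
      have hre : rest ≠ [] := by
        rintro rfl
        exact hlast (by simp)
      have hrlast : rest.getLast? ≠ some '|' := by
        rwa [getLast?_append_ne (by simp : (('|' :: rest : List Char)) ≠ []),
          getLast?_cons_ne_nil hre] at hlast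
      have hrlen : rest.length ≤ n := by
        simp only [List.length_append, List.length_cons] at hlen
        omega
      obtain ⟨hst1, hlv1'⟩ := (main_P (n + 1) H t1 ht1len hnb1 ht1last).2 hlv1 b 0 p
      rcases hT : t1.foldl pvStep ([(b, 0)], 0, p) with ⟨fs1, l1, p1⟩
      rw [hT] at hst1 hlv1'
      dsimp only at hst1 hlv1'
      subst hst1
      subst hlv1'
      have hsum1 : (0 : Int) + ((spR t1 0).map maxDoorL).sum = maxDoorL t1 := by
        rw [zero_add, ← maxDoorL_parens hnb1 ht1last]
      rw [List.foldl_append, hT, List.foldl_cons,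
        pvStep_bar b (0 + ((spR t1 0).map maxDoorL).sum) [] 0 p1 le_rfl, hsum1,
        ihn (EqBelow_mono H) rest hrlen hrlast (max b (maxDoorL t1)) '|',
        hsbeq, List.map_cons,
        listMax_cons _ (fun hmap => sbR_ne_nil rest 0 (List.map_eq_nil_iff.mp hmap)),
        max_assoc]

theorem main_equiv : ∀ (cs : List Char), maxDoorL cs = oldAltL cs := by
  have key : ∀ (n : Nat) (cs : List Char), cs.length ≤ n → maxDoorL cs = oldAltL cs := by
    intro n
    induction n with
    | zero =>
      intro cs hlen
      have hnil : cs = [] := List.eq_nil_of_length_eq_zero (Nat.le_zero.mp hlen)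
      subst hnil
      rw [maxDoorL_nil]
      rfl
    | succ n ihn =>
      intro cs hlen
      by_cases hlast : cs.getLast? = some '|'
      · rw [maxDoorL_last_bar hlast, oldAltL, if_pos hlast]
      · have H : EqBelow (n + 1) := fun v hv => ihn v (by omega)
        rw [maxDoorL_bars hlast, oldAltL, if_neg hlast,
          main_bars (n + 1) H cs hlen hlast 0 ' ']
        have hnn : 0 ≤ listMax ((sbR cs 0).map maxDoorL) := by
          rcases hm : (sbR cs 0).map maxDoorL with _ | ⟨x, xs⟩
          · exact absurd (List.map_eq_nil_iff.mp hm) (sbR_ne_nil cs 0)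
          · have hx : 0 ≤ x := by
              have hxmem : x ∈ (sbR cs 0).map maxDoorL := by
                rw [hm]; exact List.mem_cons_self
              obtain ⟨q, _, rfl⟩ := List.mem_map.mp hxmem
              exact maxDoorL_nonneg q
            calc (0:Int) ≤ x := hx
              _ ≤ xs.foldl max x := (PySem.List.le_foldl_max xs x).1
        exact (max_eq_right hnn).symm
  exact fun cs => key cs.length cs le_rfl

-- ---- B's machine coincides with the guarded reference machine when the level never
-- drops below 0 (which Pre_ guarantees) ----

theorem balUpd (l : Int) (c : Char) :
    (if c = '(' then l + 1 else if c = ')' then l - 1 else l) = pvUpd l c := by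
  by_cases h1 : c = '('
  · subst h1; rw [if_pos rfl, pvUpd_open]
  · rw [if_neg h1]
    by_cases h2 : c = ')'
    · subst h2; rw [if_pos rfl, pvUpd_close]
    · rw [if_neg h2, pvUpd_other l h2 h1]

theorem balChk_hiAll : ∀ (cs : List Char) (l : Int), balChk cs l = true → hiAll cs l := by
  intro cs; induction cs with
  | nil => intro l _; trivial
  | cons c cs ih =>
    intro l h
    simp only [balChk, balUpd, Bool.and_eq_true, decide_eq_true_eq] at h
    exact ⟨h.1, ih (pvUpd l c) h.2⟩

-- the while-loop computes the same value as pvFinish on the full frame list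
theorem altUnwind_eq_pvFinish : ∀ (rest : List (Int × Int)) (b c : Int),
    altUnwind rest b c = pvFinish ((b, c) :: rest) := by
  intro rest
  induction rest with
  | nil => intro b c; rfl
  | cons f rest ih =>
    obtain ⟨b2, c2⟩ := f
    intro b c
    show altUnwind rest b2 (c2 + max b c)
        = ((b2, c2) :: rest).foldl (fun v f => max f.1 (f.2 + v)) (max b c)
    rw [ih b2 (c2 + max b c), List.foldl_cons]
    rfl

-- the step-by-step correspondence: B's machine with stack `stk` and loose frame (b,c)
-- runs like the reference machine with stack (b,c)::stk at level stk.length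
theorem corr : ∀ (cs : List Char) (stk : List (Int × Int)) (b c : Int) (p : Char),
    hiAll cs (stk.length : Int) →
    ∃ stk' b' c' p', altRun stk b c p cs = some (stk', b', c', p') ∧
      cs.foldl pvStep ((b, c) :: stk, (stk.length : Int), p)
        = ((b', c') :: stk', lvlOf cs (stk.length : Int), p') := by
  intro cs
  induction cs with
  | nil =>
    intro stk b c p _
    exact ⟨stk, b, c, p, rfl, rfl⟩
  | cons c0 cs ih =>
    intro stk b c p hhi
    obtain ⟨hh1, hh2⟩ := hhi
    have hl0 : (0 : Int) ≤ (stk.length : Int) := Int.natCast_nonneg _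
    by_cases h1 : c0 = '('
    · subst h1
      rw [pvUpd_open] at hh1 hh2
      have hlen : ((((b, c) :: stk).length : Nat) : Int) = (stk.length : Int) + 1 := by
        push_cast [List.length_cons]; ring
      obtain ⟨stk', b', c', p', ha, hf⟩ := ih ((b, c) :: stk) 0 0 '(' (by rw [hlen]; exact hh2)
      refine ⟨stk', b', c', p', ?_, ?_⟩
      · simp only [altRun, if_pos (rfl : ('(' : Char) = '(')]
        exact ha
      · rw [List.foldl_cons, pvStep_open _ _ _ hl0, show (stk.length : Int) + 1
          = (((b, c) :: stk).length : Int) by rw [hlen], hf, lvlOf_cons, pvUpd_open, hlen]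
    · by_cases h2 : c0 = ')'
      · subst h2
        rw [pvUpd_close] at hh1 hh2
        rcases stk with _ | ⟨⟨b2, c2⟩, rest⟩
        · exfalso; simp at hh1
        · have hlen : ((((b2, c2) :: rest).length : Nat) : Int) - 1 = (rest.length : Int) := by
            push_cast [List.length_cons]; ring
          obtain ⟨stk', b', c', p', ha, hf⟩ := ih rest b2
            (c2 + (if p = '|' then 0 else max b c)) ')' (by rw [← hlen]; exact hh2)
          refine ⟨stk', b', c', p', ?_, ?_⟩
          · simp only [altRun, if_neg (by decide : ¬ (')' : Char) = '(')]
            exact ha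
          · rw [List.foldl_cons,
              pvStep_close b c b2 c2 rest _ _ (by push_cast [List.length_cons]; omega),
              hlen, hf, lvlOf_cons, pvUpd_close, hlen]
      · by_cases h3 : c0 = '|'
        · subst h3
          rw [pvUpd_other _ (by decide) (by decide)] at hh1 hh2
          obtain ⟨stk', b', c', p', ha, hf⟩ := ih stk (max b c) 0 '|' hh2
          refine ⟨stk', b', c', p', ?_, ?_⟩
          · simp only [altRun, if_neg (by decide : ¬ ('|' : Char) = '('),
              if_neg (by decide : ¬ ('|' : Char) = ')')]
            exact ha
          · rw [List.foldl_cons, pvStep_bar b c stk _ _ hl0, hf, lvlOf_cons,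
              pvUpd_other _ (by decide) (by decide)]
        · rw [pvUpd_other _ h2 h1] at hh1 hh2
          obtain ⟨stk', b', c', p', ha, hf⟩ := ih stk b (c + 1) c0 hh2
          refine ⟨stk', b', c', p', ?_, ?_⟩
          · simp only [altRun, if_neg h1, if_neg h2, if_neg h3]
            exact ha
          · rw [List.foldl_cons, pvStep_other b c stk _ _ h1 h2 h3, pvUpd_other _ h2 h1, hf,
              lvlOf_cons, pvUpd_other _ h2 h1]

theorem alt_eq_old {cs : List Char} (h : balChk cs 0 = true) : maxDoorAltL cs = oldAltL cs := by
  have hhi := balChk_hiAll cs 0 h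
  obtain ⟨stk', b', c', p', ha, hf⟩ := corr cs [] 0 0 ' ' hhi
  simp only [List.length_nil, Nat.cast_zero] at hf
  have hp' : p' = cs.getLast?.getD ' ' := by
    have := run_prev cs [(0, 0)] 0 ' '
    rw [hf] at this
    exact this
  rw [maxDoorAltL, ha]
  show (if p' = '|' then 0 else altUnwind stk' b' c') = oldAltL cs
  rw [oldAltL, hf]
  by_cases hlast : cs.getLast? = some '|'
  · rw [if_pos hlast, if_pos (by rw [hp', hlast]; rfl)]
  · rw [if_neg hlast, if_neg (by
      rw [hp']
      rcases hgl : cs.getLast? with _ | x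
      · decide
      · simpa [hgl] using hlast), altUnwind_eq_pvFinish]

-- ===== VERDICT (by name: the statement is the Claim_ definition above) =====
theorem max_door_spec : Claim_equal_max_door := by
  intro regex _ hpre
  unfold Pre_max_door at hpre
  unfold Spec_max_door max_door max_door_alt
  rw [main_equiv regex.toList, alt_eq_old hpre]
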